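-- pv_equiv track=rewrite | github.com/Parthiv12-pm/nova-bridge | backend/core/trust_layer.py | _lookup_domain
-- ===== SOURCE A (Python) =====
-- from typing import Optional, List, Dict
--
-- TRUSTED_DOMAINS: Dict[str, dict] = {
--     # ── Demo sites (localhost) — added for hackathon demo ──────────────────
--     "localhost":              {"category": "demo",        "name": "Nova Bridge Demo Site"},
--
--     # ── Healthcare ─────────────────────────────────────────────────────────
--     "practo.com":             {"category": "healthcare",  "name": "Practo"},
--     "apollo247.com":          {"category": "healthcare",  "name": "Apollo 247"},
--     "narayanhealth.com":      {"category": "healthcare",  "name": "Narayana Health"},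
--     "fortishealthcare.com":   {"category": "healthcare",  "name": "Fortis Healthcare"},
--     "manipalhospitals.com":   {"category": "healthcare",  "name": "Manipal Hospitals"},
--     "maxhealthcare.in":       {"category": "healthcare",  "name": "Max Healthcare"},
--     "aiims.edu":              {"category": "healthcare",  "name": "AIIMS"},
--     "medanta.org":            {"category": "healthcare",  "name": "Medanta"},
--
--     # ── Pharmacy ───────────────────────────────────────────────────────────
--     "1mg.com":                {"category": "pharmacy",    "name": "1mg"},
--     "netmeds.com":            {"category": "pharmacy",    "name": "Netmeds"},
--     "medplus.in":             {"category": "pharmacy",    "name": "MedPlus"},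
--     "pharmeasy.in":           {"category": "pharmacy",    "name": "PharmEasy"},
--     "apollopharmacy.in":      {"category": "pharmacy",    "name": "Apollo Pharmacy"},
--     "reliancesmartmedical.com":{"category": "pharmacy",   "name": "Reliance Smart Medical"},
--
--     # ── Utilities & Bills ──────────────────────────────────────────────────
--     "bescom.co.in":           {"category": "utility",     "name": "BESCOM"},
--     "mahadiscom.in":          {"category": "utility",     "name": "MSEDCL"},
--     "bsnl.co.in":             {"category": "utility",     "name": "BSNL"},
--     "airtel.in":              {"category": "utility",     "name": "Airtel"},
--     "jio.com":                {"category": "utility",     "name": "Jio"},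
--     "paytm.com":              {"category": "utility",     "name": "Paytm"},
--     "phonepe.com":            {"category": "utility",     "name": "PhonePe"},
--     "billdesk.com":           {"category": "utility",     "name": "BillDesk"},
--     "torrentpower.com":       {"category": "utility",     "name": "Torrent Power"},
--
--     # ── Messaging ──────────────────────────────────────────────────────────
--     "web.whatsapp.com":       {"category": "messaging",   "name": "WhatsApp Web"},
--     "mail.google.com":        {"category": "messaging",   "name": "Gmail"},
--     "outlook.live.com":       {"category": "messaging",   "name": "Outlook"},
--
--     # ── Transport ──────────────────────────────────────────────────────────
--     "olacabs.com":            {"category": "transport",   "name": "Ola"},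
--     "uber.com":               {"category": "transport",   "name": "Uber"},
--     "rapido.bike":            {"category": "transport",   "name": "Rapido"},
--
--     # ── Government ─────────────────────────────────────────────────────────
--     "cowin.gov.in":           {"category": "government",  "name": "CoWIN"},
--     "umang.gov.in":           {"category": "government",  "name": "UMANG"},
--     "uidai.gov.in":           {"category": "government",  "name": "UIDAI / Aadhaar"},
--     "india.gov.in":           {"category": "government",  "name": "India.gov.in"},
--     "epfindia.gov.in":        {"category": "government",  "name": "EPFO"},
--     "incometax.gov.in":       {"category": "government",  "name": "Income Tax"},
-- }
--
-- def _lookup_domain(domain: str) -> Optional[dict]: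
--     """
--     Checks if domain is in trusted registry.
--     Strips port first: localhost:3000 → localhost
--     """
--     clean = domain.split(":")[0]           # strips :3000 from localhost:3000
--     if clean in TRUSTED_DOMAINS:
--         return TRUSTED_DOMAINS[clean]
--     if domain in TRUSTED_DOMAINS:
--         return TRUSTED_DOMAINS[domain]
--     for trusted, info in TRUSTED_DOMAINS.items():
--         if domain.endswith(f".{trusted}") or domain == trusted:
--             return info
--     return None
-- ===== SOURCE B (Python) =====
-- from typing import Optional, List, Dict
--
-- # Registry kept grouped by category (same overall order as A's flat dict),
-- # searched by a tiny exact-lookup helper; the suffix phase walks the dot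
-- # positions of the raw domain instead of scanning the registry.
-- REGISTRY: List[tuple] = [
--     ("demo", [
--         ("localhost", "Nova Bridge Demo Site"),
--     ]),
--     ("healthcare", [
--         ("practo.com", "Practo"),
--         ("apollo247.com", "Apollo 247"),
--         ("narayanhealth.com", "Narayana Health"),
--         ("fortishealthcare.com", "Fortis Healthcare"),
--         ("manipalhospitals.com", "Manipal Hospitals"),
--         ("maxhealthcare.in", "Max Healthcare"),
--         ("aiims.edu", "AIIMS"),
--         ("medanta.org", "Medanta"),
--     ]),
--     ("pharmacy", [
--         ("1mg.com", "1mg"),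
--         ("netmeds.com", "Netmeds"),
--         ("medplus.in", "MedPlus"),
--         ("pharmeasy.in", "PharmEasy"),
--         ("apollopharmacy.in", "Apollo Pharmacy"),
--         ("reliancesmartmedical.com", "Reliance Smart Medical"),
--     ]),
--     ("utility", [
--         ("bescom.co.in", "BESCOM"),
--         ("mahadiscom.in", "MSEDCL"),
--         ("bsnl.co.in", "BSNL"),
--         ("airtel.in", "Airtel"),
--         ("jio.com", "Jio"),
--         ("paytm.com", "Paytm"),
--         ("phonepe.com", "PhonePe"),
--         ("billdesk.com", "BillDesk"),
--         ("torrentpower.com", "Torrent Power"),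
--     ]),
--     ("messaging", [
--         ("web.whatsapp.com", "WhatsApp Web"),
--         ("mail.google.com", "Gmail"),
--         ("outlook.live.com", "Outlook"),
--     ]),
--     ("transport", [
--         ("olacabs.com", "Ola"),
--         ("uber.com", "Uber"),
--         ("rapido.bike", "Rapido"),
--     ]),
--     ("government", [
--         ("cowin.gov.in", "CoWIN"),
--         ("umang.gov.in", "UMANG"),
--         ("uidai.gov.in", "UIDAI / Aadhaar"),
--         ("india.gov.in", "India.gov.in"),
--         ("epfindia.gov.in", "EPFO"),
--         ("incometax.gov.in", "Income Tax"),
--     ]),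
-- ]
--
--
-- def _exact(target: str) -> Optional[dict]:
--     """Exact lookup of target in the grouped registry."""
--     for category, sites in REGISTRY:
--         for dom, name in sites:
--             if dom == target:
--                 return {"category": category, "name": name}
--     return None
--
--
-- def _lookup_domain(domain: str) -> Optional[dict]:
--     """Exact lookups for clean then raw domain, then try each dot-suffix of the
--     raw domain directly (no trusted key is a dot-suffix of another, so at most
--     one suffix can hit)."""
--     clean = domain.split(":")[0]
--     hit = _exact(clean) or _exact(domain)
--     if hit is not None:
--         return hit
--     for i, ch in enumerate(domain):
--         if ch == '.':
--             hit = _exact(domain[i + 1:])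
--             if hit is not None:
--                 return hit
--     return None
-- ===== Notes on version B (the rewrite author's own statement) =====
-- stated objective: alternative
-- what changed: B stores the registry grouped by category with a small exact-lookup helper instead of A's flat dict, and replaces A's endswith-scan over every registry entry by a walk over the dot positions of the domain itself, looking each remaining suffix up exactly; correct because no trusted key is a dot-suffix of another key.
import Mathlib
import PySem

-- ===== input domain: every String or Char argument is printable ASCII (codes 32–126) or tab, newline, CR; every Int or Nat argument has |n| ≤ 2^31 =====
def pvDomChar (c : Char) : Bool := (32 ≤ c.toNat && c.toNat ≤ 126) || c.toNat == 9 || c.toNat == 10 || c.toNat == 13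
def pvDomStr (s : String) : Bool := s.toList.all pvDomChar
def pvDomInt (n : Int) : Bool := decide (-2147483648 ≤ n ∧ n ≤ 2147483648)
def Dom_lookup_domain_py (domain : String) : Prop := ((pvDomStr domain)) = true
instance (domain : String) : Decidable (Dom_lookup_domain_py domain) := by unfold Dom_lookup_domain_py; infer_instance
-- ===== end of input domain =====

-- B keeps the registry grouped by category with an exact-lookup helper and replaces A's
-- endswith-scan over the registry by a walk over the dot positions of the domain itself
-- (objective: alternative; same return value everywhere).

-- ===== PORT A =====
-- TRUSTED_DOMAINS as A holds it: one flat insertion-ordered dict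
def pvTrusted : PySem.Dict String (List (String × String)) := PySem.Dict.mk
  [ ("localhost",               [("category", "demo"),       ("name", "Nova Bridge Demo Site")]),
    ("practo.com",              [("category", "healthcare"), ("name", "Practo")]),
    ("apollo247.com",           [("category", "healthcare"), ("name", "Apollo 247")]),
    ("narayanhealth.com",       [("category", "healthcare"), ("name", "Narayana Health")]),
    ("fortishealthcare.com",    [("category", "healthcare"), ("name", "Fortis Healthcare")]),
    ("manipalhospitals.com",    [("category", "healthcare"), ("name", "Manipal Hospitals")]),
    ("maxhealthcare.in",        [("category", "healthcare"), ("name", "Max Healthcare")]),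
    ("aiims.edu",               [("category", "healthcare"), ("name", "AIIMS")]),
    ("medanta.org",             [("category", "healthcare"), ("name", "Medanta")]),
    ("1mg.com",                 [("category", "pharmacy"),   ("name", "1mg")]),
    ("netmeds.com",             [("category", "pharmacy"),   ("name", "Netmeds")]),
    ("medplus.in",              [("category", "pharmacy"),   ("name", "MedPlus")]),
    ("pharmeasy.in",            [("category", "pharmacy"),   ("name", "PharmEasy")]),
    ("apollopharmacy.in",       [("category", "pharmacy"),   ("name", "Apollo Pharmacy")]),
    ("reliancesmartmedical.com",[("category", "pharmacy"),   ("name", "Reliance Smart Medical")]),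
    ("bescom.co.in",            [("category", "utility"),    ("name", "BESCOM")]),
    ("mahadiscom.in",           [("category", "utility"),    ("name", "MSEDCL")]),
    ("bsnl.co.in",              [("category", "utility"),    ("name", "BSNL")]),
    ("airtel.in",               [("category", "utility"),    ("name", "Airtel")]),
    ("jio.com",                 [("category", "utility"),    ("name", "Jio")]),
    ("paytm.com",               [("category", "utility"),    ("name", "Paytm")]),
    ("phonepe.com",             [("category", "utility"),    ("name", "PhonePe")]),
    ("billdesk.com",            [("category", "utility"),    ("name", "BillDesk")]),
    ("torrentpower.com",        [("category", "utility"),    ("name", "Torrent Power")]),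
    ("web.whatsapp.com",        [("category", "messaging"),  ("name", "WhatsApp Web")]),
    ("mail.google.com",         [("category", "messaging"),  ("name", "Gmail")]),
    ("outlook.live.com",        [("category", "messaging"),  ("name", "Outlook")]),
    ("olacabs.com",             [("category", "transport"),  ("name", "Ola")]),
    ("uber.com",                [("category", "transport"),  ("name", "Uber")]),
    ("rapido.bike",             [("category", "transport"),  ("name", "Rapido")]),
    ("cowin.gov.in",            [("category", "government"), ("name", "CoWIN")]),
    ("umang.gov.in",            [("category", "government"), ("name", "UMANG")]),
    ("uidai.gov.in",            [("category", "government"), ("name", "UIDAI / Aadhaar")]),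
    ("india.gov.in",            [("category", "government"), ("name", "India.gov.in")]),
    ("epfindia.gov.in",         [("category", "government"), ("name", "EPFO")]),
    ("incometax.gov.in",        [("category", "government"), ("name", "Income Tax")]) ]

-- A's for-loop over TRUSTED_DOMAINS.items()
def pvScanA (items : List (String × List (String × String))) (domain : String) :
    Option (List (String × String)) :=
  match items with
  | [] => none
  | (trusted, info) :: rest =>
    if PySem.Str.endswith domain ("." ++ trusted) || domain == trusted then some info
    else pvScanA rest domain

def lookup_domain_py (domain : String) : Option (List (String × String)) :=
  let clean := ((PySem.Str.split? domain ":").getD []).headD ""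
  match pvTrusted.get? clean with
  | some info => some info
  | none =>
    match pvTrusted.get? domain with
    | some info => some info
    | none => pvScanA pvTrusted.items domain

-- ===== PORT B =====
-- REGISTRY as B holds it: the same data grouped by category
def pvRegistry : List (String × List (String × String)) :=
  [ ("demo",
      [ ("localhost", "Nova Bridge Demo Site") ]),
    ("healthcare",
      [ ("practo.com", "Practo"), ("apollo247.com", "Apollo 247"),
        ("narayanhealth.com", "Narayana Health"), ("fortishealthcare.com", "Fortis Healthcare"),
        ("manipalhospitals.com", "Manipal Hospitals"), ("maxhealthcare.in", "Max Healthcare"),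
        ("aiims.edu", "AIIMS"), ("medanta.org", "Medanta") ]),
    ("pharmacy",
      [ ("1mg.com", "1mg"), ("netmeds.com", "Netmeds"), ("medplus.in", "MedPlus"),
        ("pharmeasy.in", "PharmEasy"), ("apollopharmacy.in", "Apollo Pharmacy"),
        ("reliancesmartmedical.com", "Reliance Smart Medical") ]),
    ("utility",
      [ ("bescom.co.in", "BESCOM"), ("mahadiscom.in", "MSEDCL"), ("bsnl.co.in", "BSNL"),
        ("airtel.in", "Airtel"), ("jio.com", "Jio"), ("paytm.com", "Paytm"),
        ("phonepe.com", "PhonePe"), ("billdesk.com", "BillDesk"),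
        ("torrentpower.com", "Torrent Power") ]),
    ("messaging",
      [ ("web.whatsapp.com", "WhatsApp Web"), ("mail.google.com", "Gmail"),
        ("outlook.live.com", "Outlook") ]),
    ("transport",
      [ ("olacabs.com", "Ola"), ("uber.com", "Uber"), ("rapido.bike", "Rapido") ]),
    ("government",
      [ ("cowin.gov.in", "CoWIN"), ("umang.gov.in", "UMANG"),
        ("uidai.gov.in", "UIDAI / Aadhaar"), ("india.gov.in", "India.gov.in"),
        ("epfindia.gov.in", "EPFO"), ("incometax.gov.in", "Income Tax") ]) ]

-- B's inner for-loop of _exact over one category's sites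
def pvExactSites (category : String) (sites : List (String × String)) (target : String) :
    Option (List (String × String)) :=
  match sites with
  | [] => none
  | (dom, name) :: rest =>
    if dom == target then some [("category", category), ("name", name)]
    else pvExactSites category rest target

-- B's outer for-loop of _exact over the category groups
def pvExact (groups : List (String × List (String × String))) (target : String) :
    Option (List (String × String)) :=
  match groups with
  | [] => none
  | (category, sites) :: rest =>
    match pvExactSites category sites target with
    | some hit => some hit
    | none => pvExact rest target

-- B's for-loop over the characters of the raw domain: at each dot, exact-lookup of domain[i+1:]
def pvScanB (chars : List Char) : Option (List (String × String)) :=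
  match chars with
  | [] => none
  | ch :: rest =>
    if ch = '.' then
      match pvExact pvRegistry (String.ofList rest) with
      | some hit => some hit
      | none => pvScanB rest
    else pvScanB rest

def lookup_domain_py_alt (domain : String) : Option (List (String × String)) :=
  let clean := ((PySem.Str.split? domain ":").getD []).headD ""
  -- hit = _exact(clean) or _exact(domain); if hit is not None: return hit
  match (match pvExact pvRegistry clean with
         | some h => some h
         | none => pvExact pvRegistry domain) with
  | some hit => some hit
  | none => pvScanB domain.toList

-- ===== PRECONDITION & SPEC =====
def Spec_lookup_domain_py (domain : String) (out : Option (List (String × String))) : Prop := out = lookup_domain_py_alt domain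
instance (domain : String) (out : Option (List (String × String))) : Decidable (Spec_lookup_domain_py domain out) := by unfold Spec_lookup_domain_py; infer_instance

-- ===== CLAIM (what is proved, stated in full; the proofs are below) =====
def Claim_equal_lookup_domain_py : Prop := ∀ (domain : String), Dom_lookup_domain_py domain → Spec_lookup_domain_py domain (lookup_domain_py domain)

-- ===== LEMMAS AND PROOFS =====

-- flattening B's grouped registry in order reproduces A's flat items list
def pvFlatten (gs : List (String × List (String × String))) :
    List (String × List (String × String)) :=
  gs.flatMap (fun g => g.2.map (fun p => (p.1, [("category", g.1), ("name", p.2)])))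

theorem pvFlatten_eq : pvFlatten pvRegistry = pvTrusted.items := by decide

theorem pvExactSites_eq (category : String) (sites : List (String × String))
    (rest : List (String × List (String × String))) (target : String) :
    (PySem.Dict.mk ((sites.map (fun p => (p.1, [("category", category), ("name", p.2)]))) ++ rest)).get? target =
      (match pvExactSites category sites target with
       | some hit => some hit
       | none => (PySem.Dict.mk rest).get? target) := by
  induction sites with
  | nil => rfl
  | cons p tl ih =>
    obtain ⟨dom, name⟩ := p
    simp only [List.map_cons, List.cons_append, PySem.Dict.get?_mk_cons, pvExactSites]
    by_cases h : (dom == target) = true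
    · simp [h]
    · simp only [h, Bool.false_eq_true, if_false, ih]

theorem pvExact_eq_get? (gs : List (String × List (String × String))) (target : String) :
    pvExact gs target = (PySem.Dict.mk (pvFlatten gs)).get? target := by
  induction gs with
  | nil => rfl
  | cons g rest ih =>
    obtain ⟨category, sites⟩ := g
    simp only [pvExact, pvFlatten, List.flatMap_cons]
    rw [show (sites.map (fun p => (p.1, [("category", category), ("name", p.2)])) ++
          rest.flatMap (fun g => g.2.map (fun p => (p.1, [("category", g.1), ("name", p.2)])))) =
        (sites.map (fun p => (p.1, [("category", category), ("name", p.2)])) ++ pvFlatten rest) from rfl]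
    rw [pvExactSites_eq]
    cases pvExactSites category sites target with
    | some hit => rfl
    | none => simpa using ih

-- the bridge: B's exact helper computes exactly A's dict lookup
theorem pvExact_bridge (target : String) :
    pvExact pvRegistry target = pvTrusted.get? target := by
  rw [pvExact_eq_get?, pvFlatten_eq]

-- registry keys are pairwise distinct
theorem pvKeysNodup : pvTrusted.keys.Nodup := by decide

-- no registry key is ".<another key>"-suffixed: at most one key can dot-suffix-match a domain
theorem pvNoDotSuffix :
    (pvTrusted.items.all (fun p => pvTrusted.items.all
      (fun q => !(List.isSuffixOf ('.' :: p.1.toList) q.1.toList)))) = true := by decide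

theorem pv_uniq {d : List Char} {k v k' v'}
    (h : (k, v) ∈ pvTrusted.items) (h' : (k', v') ∈ pvTrusted.items)
    (s : ('.' :: k.toList) <:+ d) (s' : ('.' :: k'.toList) <:+ d) : k = k' := by
  have hn : ∀ p ∈ pvTrusted.items, ∀ q ∈ pvTrusted.items,
      ¬ (('.' :: p.1.toList) <:+ q.1.toList) := by
    intro p hp q hq hsuf
    have h0 := pvNoDotSuffix
    rw [List.all_eq_true] at h0
    have h1 := h0 p hp
    rw [List.all_eq_true] at h1
    have h2 := h1 q hq
    rw [Bool.not_eq_eq_eq_not, Bool.not_true, ← Bool.not_eq_true,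
        List.isSuffixOf_iff_suffix] at h2
    exact h2 hsuf
  rcases List.suffix_or_suffix_of_suffix s s' with hss | hss
  · rcases List.suffix_cons_iff.mp hss with he | ht
    · injection he with _ he2; exact String.toList_inj.mp he2
    · exact absurd ht (hn (k, v) h (k', v') h')
  · rcases List.suffix_cons_iff.mp hss with he | ht
    · injection he with _ he2; exact (String.toList_inj.mp he2).symm
    · exact absurd ht (hn (k', v') h' (k, v) h)

theorem pv_scanB_none (d : String)
    (hno : ∀ p ∈ pvTrusted.items, ¬ (('.' :: p.1.toList) <:+ d.toList)) :
    ∀ t : List Char, t <:+ d.toList → pvScanB t = none := by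
  intro t
  induction t with
  | nil => intro _; rfl
  | cons c rest ih =>
    intro ht
    have hrest : rest <:+ d.toList := (List.suffix_cons c rest).trans ht
    by_cases hc : c = '.'
    · subst hc
      cases hg : pvTrusted.get? (String.ofList rest) with
      | some v =>
        exact absurd (by simpa using ht)
          (hno _ (PySem.Dict.mem_items_of_get?_eq_some _ hg))
      | none => simp only [pvScanB, pvExact_bridge, hg]; exact ih hrest
    · simp only [pvScanB, if_neg hc]; exact ih hrest

theorem pv_scanB_finds (d : String) (k : String) (v : List (String × String))
    (hk : (k, v) ∈ pvTrusted.items) (hkd : ('.' :: k.toList) <:+ d.toList) :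
    ∀ t : List Char, t <:+ d.toList → ('.' :: k.toList) <:+ t → pvScanB t = some v := by
  intro t
  induction t with
  | nil => intro _ hs; exact absurd (List.suffix_nil.mp hs) (by simp)
  | cons c rest ih =>
    intro ht hs
    have hrest : rest <:+ d.toList := (List.suffix_cons c rest).trans ht
    rcases List.suffix_cons_iff.mp hs with he | htl
    · injection he with he1 he2
      have hg : pvTrusted.get? (String.ofList rest) = some v := by
        rw [← he2]; simpa using PySem.Dict.get?_of_mem_items _ hk pvKeysNodup
      simp only [pvScanB, if_pos he1.symm, pvExact_bridge, hg]
    · by_cases hc : c = '.'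
      · subst hc
        cases hg : pvTrusted.get? (String.ofList rest) with
        | some v' =>
          exfalso
          have hm := PySem.Dict.mem_items_of_get?_eq_some _ hg
          have hs' : ('.' :: (String.ofList rest).toList) <:+ d.toList := by simpa using ht
          have hkk := pv_uniq hk hm hkd hs'
          have : ('.' :: k.toList) <:+ k.toList := by
            have : rest = k.toList := by rw [hkk]; simp
            rwa [this] at htl
          have := this.length_le
          simp at this
        | none => simp only [pvScanB, pvExact_bridge, hg]; exact ih hrest htl
      · simp only [pvScanB, if_neg hc]; exact ih hrest htl

theorem pv_scanA_eq_find (d : String) :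
    ∀ l, pvScanA l d =
      (l.find? (fun p => PySem.Str.endswith d ("." ++ p.1) || d == p.1)).map (·.2) := by
  intro l
  induction l with
  | nil => rfl
  | cons p rest ih =>
    obtain ⟨trusted, info⟩ := p
    unfold pvScanA
    by_cases hcond : (PySem.Str.endswith d ("." ++ trusted) || d == trusted) = true
    · rw [if_pos hcond]
      simp only [List.find?, hcond, Option.map_some]
    · have hfalse : (PySem.Str.endswith d ("." ++ trusted) || d == trusted) = false := by
        simpa using hcond
      rw [if_neg hcond]
      simp only [List.find?, hfalse]
      exact ih

theorem pv_endswith_iff (d k : String) :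
    PySem.Str.endswith d ("." ++ k) = true ↔ ('.' :: k.toList) <:+ d.toList := by
  simp [PySem.Chars.endswith_iff]

theorem pv_main (d : String) (h2 : pvTrusted.get? d = none) :
    pvScanA pvTrusted.items d = pvScanB d.toList := by
  have hnk : ∀ p ∈ pvTrusted.items, d ≠ p.1 := by
    intro p hp he
    rw [PySem.Dict.get?_eq_none_iff_not_mem_keys _ _] at h2
    exact h2 (he ▸ PySem.Dict.mem_keys_of_mem_items _ hp)
  rw [pv_scanA_eq_find]
  cases hf : pvTrusted.items.find? (fun p => PySem.Str.endswith d ("." ++ p.1) || d == p.1) with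
  | none =>
    rw [pv_scanB_none d _ d.toList (List.suffix_refl d.toList)]
    · rfl
    · intro p hp hsuf
      have := List.find?_eq_none.mp hf p hp
      rw [Bool.or_eq_true, not_or] at this
      exact this.1 ((pv_endswith_iff d p.1).mpr hsuf)
  | some p =>
    have hmem := List.mem_of_find?_eq_some hf
    have hcond := List.find?_some hf
    rw [Bool.or_eq_true] at hcond
    rcases hcond with hend | heq
    · have hsuf := (pv_endswith_iff d p.1).mp hend
      rw [pv_scanB_finds d p.1 p.2 hmem hsuf d.toList (List.suffix_refl d.toList) hsuf]
      rfl
    · exact absurd (eq_of_beq heq) (hnk p hmem)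

-- ===== VERDICT (by name: the statement is the Claim_ definition above) =====
theorem lookup_domain_py_spec : Claim_equal_lookup_domain_py := by
  intro d _
  simp only [Spec_lookup_domain_py, lookup_domain_py, lookup_domain_py_alt, pvExact_bridge]
  cases pvTrusted.get? (((PySem.Str.split? d ":").getD []).headD "") with
  | some v => rfl
  | none =>
    cases h2 : pvTrusted.get? d with
    | some v => rfl
    | none => exact pv_main d h2
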